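-- pv_equiv track=rewrite | github.com/islamike/PythonBasics | numberplate.py | solution
-- ===== SOURCE A (Python) =====
-- def solution(plate1,plate2):
--     from_char = "OQITZSB"
--     to_char = "0011258"
--     p1 = plate1.replace(" ", "")
--     p2 = plate2.replace(" ", "")
--
--     for i in from_char:
--         if i in plate1:
--             p1 = p1.replace(i, to_char[from_char.index(i)])
--         if i in plate2:
--             p2 = p2.replace(i, to_char[from_char.index(i)])
--     return p1 == p2
-- ===== SOURCE B (Python) =====
-- def solution(plate1, plate2):
--     mapping = {'O': '0', 'Q': '0', 'I': '1', 'T': '1', 'Z': '2', 'S': '5', 'B': '8'}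
--
--     def norm(p):
--         return ''.join(mapping.get(c, c) for c in p if c != ' ')
--
--     return norm(plate1) == norm(plate2)
-- ===== Notes on version B (the rewrite author's own statement) =====
-- stated objective: idiomatic
-- what changed: A strips spaces then rescans each plate seven times with guarded str.replace calls plus from_char.index lookups; B builds the char mapping once as a dict and normalizes each plate in a single left-to-right pass emitting mapping.get(c, c) for non-space characters.
import Mathlib
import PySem

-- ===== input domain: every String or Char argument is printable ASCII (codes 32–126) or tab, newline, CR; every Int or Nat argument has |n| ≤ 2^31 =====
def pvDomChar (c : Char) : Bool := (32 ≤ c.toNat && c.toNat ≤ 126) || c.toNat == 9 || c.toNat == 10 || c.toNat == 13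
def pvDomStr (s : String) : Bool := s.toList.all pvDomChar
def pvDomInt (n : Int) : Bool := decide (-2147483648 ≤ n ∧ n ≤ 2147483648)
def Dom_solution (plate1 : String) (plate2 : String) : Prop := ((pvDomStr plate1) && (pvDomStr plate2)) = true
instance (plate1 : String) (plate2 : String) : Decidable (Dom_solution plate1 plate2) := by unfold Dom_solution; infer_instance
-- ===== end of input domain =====

-- B replaces A's seven guarded str.replace rescans with a dict built once and a single
-- left-to-right normalizing pass per plate (objective: idiomatic; same return value).

-- ===== PORT A =====
def solution (plate1 : String) (plate2 : String) : Bool :=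
  let from_char := "OQITZSB"
  let to_char := "0011258"
  let p1 := PySem.Str.replace plate1 " " ""
  let p2 := PySem.Str.replace plate2 " " ""
  let pp : String × String :=
    from_char.toList.foldl (fun (st : String × String) i =>
      -- to_char[from_char.index(i)]: i always comes from from_char, so .index = find and
      -- never raises; pyGetD's default ' ' is unreachable (the index is always in range).
      let r := String.ofList
        [PySem.List.pyGetD to_char.toList (PySem.Str.find from_char (String.ofList [i])) ' ']
      let q1 := if PySem.Str.isIn (String.ofList [i]) plate1
                then PySem.Str.replace st.1 (String.ofList [i]) r else st.1
      let q2 := if PySem.Str.isIn (String.ofList [i]) plate2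
                then PySem.Str.replace st.2 (String.ofList [i]) r else st.2
      (q1, q2)) (p1, p2)
  pp.1 == pp.2

-- ===== PORT B =====
def pvMapping : PySem.Dict Char Char :=
  PySem.Dict.ofList [('O','0'),('Q','0'),('I','1'),('T','1'),('Z','2'),('S','5'),('B','8')]

def pvNorm (p : String) : String :=
  String.ofList ((p.toList.filter (fun c => !(c == ' '))).map (fun c => pvMapping.getD c c))

def solution_alt (plate1 : String) (plate2 : String) : Bool :=
  pvNorm plate1 == pvNorm plate2

-- ===== PRECONDITION & SPEC =====
def Spec_solution (plate1 : String) (plate2 : String) (out : Bool) : Prop := out = solution_alt plate1 plate2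
instance (plate1 : String) (plate2 : String) (out : Bool) : Decidable (Spec_solution plate1 plate2 out) := by unfold Spec_solution; infer_instance

-- ===== CLAIM (what is proved, stated in full; the proofs are below) =====
def Claim_equal_solution : Prop := ∀ (plate1 : String) (plate2 : String), Dom_solution plate1 plate2 → Spec_solution plate1 plate2 (solution plate1 plate2)

-- ===== LEMMAS AND PROOFS =====

-- single-char substitution function (what one str.replace pass does per character)
def pvM (c d x : Char) : Char := if x = c then d else x

-- one guarded replace step of A, on char lists (orig = the un-stripped plate)
def pvStepA (orig q : List Char) (c d : Char) : List Char :=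
  if PySem.Chars.isIn [c] orig = true then PySem.Chars.replace q [c] [d] else q

-- invariant: every char of the working string comes from the plate or is a target digit
def pvInv (orig q : List Char) : Prop :=
  ∀ x ∈ q, x ∈ orig ∨ x ∈ (['0','1','2','5','8'] : List Char)

theorem pv_go_single (c : Char) (new : List Char) :
    ∀ (l : List Char) (fuel : Nat) (acc : List Char), l.length ≤ fuel →
      PySem.Chars.replace.go [c] new fuel l acc
        = acc.reverse ++ l.flatMap (fun x => if x = c then new else [x]) := by
  intro l
  induction l with
  | nil => intro fuel acc h; cases fuel <;> simp [PySem.Chars.replace.go]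
  | cons x t ih =>
      intro fuel acc h
      cases fuel with
      | zero => simp at h
      | succ f =>
          simp only [PySem.Chars.replace.go]
          by_cases hx : x = c
          · simp [hx, List.isPrefixOf, ih f _ (by simpa using h)]
          · have : [c].isPrefixOf (x :: t) = false := by
              simp [List.isPrefixOf]; exact fun h' => hx h'.symm
            simp [this, hx, ih f _ (by simpa using h)]

theorem pv_replace_single (s : List Char) (c : Char) (new : List Char) :
    PySem.Chars.replace s [c] new = s.flatMap (fun x => if x = c then new else [x]) := by
  simp [PySem.Chars.replace, pv_go_single c new s s.length [] le_rfl]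

theorem pv_repl_map (q : List Char) (c d : Char) :
    PySem.Chars.replace q [c] [d] = q.map (pvM c d) := by
  rw [pv_replace_single,
    show (fun x => if x = c then [d] else [x]) = (fun x => [pvM c d x]) from by
      funext x; unfold pvM; split <;> rfl]
  exact List.map_eq_flatMap.symm

theorem pv_strip_eq (s : List Char) :
    PySem.Chars.replace s [' '] [] = s.filter (fun x => !(x == ' ')) := by
  rw [pv_replace_single]
  induction s with
  | nil => rfl
  | cons a t ih => by_cases ha : a = ' ' <;> simp [ha, ih]

theorem pv_isIn_single (c : Char) (s : List Char) :
    PySem.Chars.isIn [c] s = true ↔ c ∈ s := by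
  rw [PySem.Chars.isIn_iff_infix]; exact List.singleton_infix_iff c s

theorem pv_step_eq {orig q : List Char} (c d : Char)
    (h0 : c ∉ (['0','1','2','5','8'] : List Char)) (hq : pvInv orig q) :
    pvStepA orig q c d = q.map (pvM c d) := by
  by_cases hin : PySem.Chars.isIn [c] orig = true
  · simp [pvStepA, hin, pv_repl_map]
  · have hco : c ∉ orig := fun hm => hin ((pv_isIn_single c orig).mpr hm)
    have hcq : c ∉ q := fun hm => (hq c hm).elim hco h0
    simp only [pvStepA, hin]
    exact ((List.map_congr_left
      (fun x hx => if_neg (fun (e : x = c) => hcq (e ▸ hx)))).trans (List.map_id q)).symm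

theorem pv_inv_map {orig q : List Char} (c d : Char)
    (hq : pvInv orig q) (hd : d ∈ (['0','1','2','5','8'] : List Char)) :
    pvInv orig (q.map (pvM c d)) := by
  intro x hx
  rcases List.mem_map.mp hx with ⟨y, hy, rfl⟩
  by_cases h : y = c
  · simp only [pvM, h, if_pos]; exact Or.inr hd
  · simp only [pvM, if_neg h]; exact hq y hy

theorem pv_inv_strip (s : List Char) : pvInv s (s.filter (fun x => !(x == ' '))) :=
  fun _ hx => Or.inl (List.mem_of_mem_filter hx)

theorem pv_getD_unmapped (x : Char) (h1 : ¬ x = 'O') (h2 : ¬ x = 'Q') (h3 : ¬ x = 'I')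
    (h4 : ¬ x = 'T') (h5 : ¬ x = 'Z') (h6 : ¬ x = 'S') (h7 : ¬ x = 'B') :
    pvMapping.getD x x = x := by
  simp only [PySem.Dict.getD, PySem.Dict.get?,
    show pvMapping.items = [('O','0'),('Q','0'),('I','1'),('T','1'),('Z','2'),('S','5'),('B','8')]
      from by decide,
    List.find?,
    beq_eq_false_iff_ne.mpr (Ne.symm h1), beq_eq_false_iff_ne.mpr (Ne.symm h2),
    beq_eq_false_iff_ne.mpr (Ne.symm h3), beq_eq_false_iff_ne.mpr (Ne.symm h4),
    beq_eq_false_iff_ne.mpr (Ne.symm h5), beq_eq_false_iff_ne.mpr (Ne.symm h6),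
    beq_eq_false_iff_ne.mpr (Ne.symm h7)]
  rfl

theorem pv_comp_norm (x : Char) :
    pvM 'B' '8' (pvM 'S' '5' (pvM 'Z' '2' (pvM 'T' '1' (pvM 'I' '1' (pvM 'Q' '0' (pvM 'O' '0' x))))))
      = pvMapping.getD x x := by
  by_cases h1 : x = 'O'; · subst h1; decide
  by_cases h2 : x = 'Q'; · subst h2; decide
  by_cases h3 : x = 'I'; · subst h3; decide
  by_cases h4 : x = 'T'; · subst h4; decide
  by_cases h5 : x = 'Z'; · subst h5; decide
  by_cases h6 : x = 'S'; · subst h6; decide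
  by_cases h7 : x = 'B'; · subst h7; decide
  simp only [pvM, if_neg h1, if_neg h2, if_neg h3, if_neg h4, if_neg h5, if_neg h6, if_neg h7]
  exact (pv_getD_unmapped x h1 h2 h3 h4 h5 h6 h7).symm

theorem pv_map7 (l : List Char) :
    ((((((l.map (pvM 'O' '0')).map (pvM 'Q' '0')).map (pvM 'I' '1')).map (pvM 'T' '1')).map
        (pvM 'Z' '2')).map (pvM 'S' '5')).map (pvM 'B' '8')
      = l.map (fun c => pvMapping.getD c c) := by
  induction l with
  | nil => rfl
  | cons a t ih =>
      simp only [List.map_cons]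
      rw [ih, pv_comp_norm a]

theorem pv_normA (s : List Char) :
    pvStepA s (pvStepA s (pvStepA s (pvStepA s (pvStepA s (pvStepA s (pvStepA s
        (PySem.Chars.replace s [' '] []) 'O' '0') 'Q' '0') 'I' '1') 'T' '1') 'Z' '2') 'S' '5') 'B' '8'
      = (s.filter (fun x => !(x == ' '))).map (fun c => pvMapping.getD c c) := by
  rw [pv_strip_eq]
  have i0 := pv_inv_strip s
  rw [pv_step_eq 'O' '0' (by decide) i0]
  have i1 := pv_inv_map 'O' '0' i0 (by decide)
  rw [pv_step_eq 'Q' '0' (by decide) i1]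
  have i2 := pv_inv_map 'Q' '0' i1 (by decide)
  rw [pv_step_eq 'I' '1' (by decide) i2]
  have i3 := pv_inv_map 'I' '1' i2 (by decide)
  rw [pv_step_eq 'T' '1' (by decide) i3]
  have i4 := pv_inv_map 'T' '1' i3 (by decide)
  rw [pv_step_eq 'Z' '2' (by decide) i4]
  have i5 := pv_inv_map 'Z' '2' i4 (by decide)
  rw [pv_step_eq 'S' '5' (by decide) i5]
  have i6 := pv_inv_map 'S' '5' i5 (by decide)
  rw [pv_step_eq 'B' '8' (by decide) i6]
  exact pv_map7 _

theorem pv_beq_toList (s t : String) : (s == t) = (s.toList == t.toList) := by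
  by_cases h : s = t
  · simp [h]
  · have h' : s.toList ≠ t.toList := fun e => h (String.toList_injective e)
    simp [h, h']

theorem pv_side (plate : String) :
    (pvStepA plate.toList (pvStepA plate.toList (pvStepA plate.toList (pvStepA plate.toList
      (pvStepA plate.toList (pvStepA plate.toList (pvStepA plate.toList
        (PySem.Chars.replace plate.toList [' '] []) 'O' '0') 'Q' '0') 'I' '1') 'T' '1') 'Z' '2')
        'S' '5') 'B' '8')
      = (pvNorm plate).toList := by
  rw [pv_normA]; unfold pvNorm; rw [String.toList_ofList]

theorem solution_eq_alt (plate1 plate2 : String) :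
    solution plate1 plate2 = solution_alt plate1 plate2 := by
  unfold solution solution_alt
  simp only [show "OQITZSB".toList = ['O','Q','I','T','Z','S','B'] from by decide,
    List.foldl_cons, List.foldl_nil]
  rw [pv_beq_toList, pv_beq_toList]
  simp only [PySem.Str.replace, PySem.Str.isIn_eq, String.toList_ofList,
    apply_ite String.toList,
    show (" " : String).toList = [' '] from by decide,
    show ("" : String).toList = ([] : List Char) from by decide]
  rw [← pv_side plate1, ← pv_side plate2]
  rfl

-- ===== VERDICT (by name: the statement is the Claim_ definition above) =====
theorem solution_spec : Claim_equal_solution := by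
  intro plate1 plate2 _
  unfold Spec_solution
  exact solution_eq_alt plate1 plate2
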